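-- pv_equiv track=rewrite | github.com/Viewer-HX/github-release-log-generator | utils.py | categorize_file_changes
-- ===== SOURCE A (Python) =====
-- from typing import List, Dict, Any, Optional
--
-- def categorize_file_changes(file_changes: List[Dict]) -> Dict[str, List[str]]:
--     """Categorize file changes by type"""
--     categories = {
--         'source_code': [],
--         'tests': [],
--         'documentation': [],
--         'config': [],
--         'dependencies': [],
--         'other': []
--     }
--
--     for change in file_changes:
--         file_path = change.get('file_path', '')
--
--         # Categorize based on file path and extension
--         if any(pattern in file_path for pattern in ['/test/', '_test.', '.test.', '/tests/', 'spec.']) or \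
--            file_path.startswith('test/') or file_path.startswith('tests/') or \
--            '/test/' in file_path or '/tests/' in file_path:
--             categories['tests'].append(file_path)
--         elif any(file_path.endswith(ext) for ext in ['.md', '.txt', '.rst', '.adoc']):
--             categories['documentation'].append(file_path)
--         elif any(pattern in file_path for pattern in ['package.json', 'requirements.txt', 'Gemfile', 'pom.xml', 'build.gradle']):
--             categories['dependencies'].append(file_path)
--         elif any(file_path.endswith(ext) for ext in ['.json', '.yaml', '.yml', '.toml', '.ini', '.env']):
--             categories['config'].append(file_path)
--         elif any(file_path.endswith(ext) for ext in ['.py', '.js', '.ts', '.java', '.cpp', '.c', '.go', '.rb', '.php', '.rs', '.swift']):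
--             categories['source_code'].append(file_path)
--         else:
--             categories['other'].append(file_path)
--
--     return categories
-- ===== SOURCE B (Python) =====
-- def categorize_file_changes(file_changes):
--     """Categorize file changes by type"""
--     rules = [
--         ('tests', lambda p: any(x in p for x in ['/test/', '_test.', '.test.', '/tests/', 'spec.'])
--                   or p.startswith('test/') or p.startswith('tests/')),
--         ('documentation', lambda p: p.endswith(('.md', '.txt', '.rst', '.adoc'))),
--         ('dependencies', lambda p: any(x in p for x in ['package.json', 'requirements.txt', 'Gemfile', 'pom.xml', 'build.gradle'])),
--         ('config', lambda p: p.endswith(('.json', '.yaml', '.yml', '.toml', '.ini', '.env'))),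
--         ('source_code', lambda p: p.endswith(('.py', '.js', '.ts', '.java', '.cpp', '.c', '.go', '.rb', '.php', '.rs', '.swift'))),
--     ]
--
--     def category(p):
--         return next((name for name, pred in rules if pred(p)), 'other')
--
--     paths = [change.get('file_path', '') for change in file_changes]
--     return {name: [p for p in paths if category(p) == name]
--             for name in ['source_code', 'tests', 'documentation', 'config', 'dependencies', 'other']}
-- ===== Notes on version B (the rewrite author's own statement) =====
-- stated objective: idiomatic
-- what changed: Replaces the single-pass if/elif cascade appending into a pre-built dict by a table-driven rule list with a first-match category function, a precomputed path list, and a per-bucket filter comprehension building the result dict.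
import Mathlib
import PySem

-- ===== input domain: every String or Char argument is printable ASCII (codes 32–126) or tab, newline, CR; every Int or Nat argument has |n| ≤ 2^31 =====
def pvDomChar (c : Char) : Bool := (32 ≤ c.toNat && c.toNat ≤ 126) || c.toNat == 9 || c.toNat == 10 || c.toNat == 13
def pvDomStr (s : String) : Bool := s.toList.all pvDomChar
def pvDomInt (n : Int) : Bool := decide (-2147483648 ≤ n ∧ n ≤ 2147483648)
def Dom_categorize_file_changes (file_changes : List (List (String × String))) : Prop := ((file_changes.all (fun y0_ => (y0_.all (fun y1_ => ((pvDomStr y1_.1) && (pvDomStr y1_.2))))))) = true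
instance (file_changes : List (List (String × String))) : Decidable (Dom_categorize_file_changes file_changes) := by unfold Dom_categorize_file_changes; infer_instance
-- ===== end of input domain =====

-- B replaces A's if/elif cascade appending into a mutated dict by a table-driven
-- first-match category function and a per-bucket filter comprehension (idiomatic).

-- ===== PORT A =====
def categorize_file_changes (file_changes : List (List (String × String))) : List (String × List String) :=
  let categories : PySem.Dict String (List String) :=
    (((((PySem.Dict.empty.insert "source_code" []).insert "tests" []).insert
        "documentation" []).insert "config" []).insert "dependencies" []).insert "other" []
  let categories := file_changes.foldl (fun categories change =>
    let file_path := (PySem.Dict.mk change).getD "file_path" ""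
    if (["/test/", "_test.", ".test.", "/tests/", "spec."].any (fun pattern => PySem.Str.isIn pattern file_path))
       || PySem.Str.startswith file_path "test/" || PySem.Str.startswith file_path "tests/"
       || PySem.Str.isIn "/test/" file_path || PySem.Str.isIn "/tests/" file_path then
      categories.modify "tests" [] (fun l => l ++ [file_path])
    else if ([".md", ".txt", ".rst", ".adoc"].any (fun ext => PySem.Str.endswith file_path ext)) then
      categories.modify "documentation" [] (fun l => l ++ [file_path])
    else if (["package.json", "requirements.txt", "Gemfile", "pom.xml", "build.gradle"].any (fun pattern => PySem.Str.isIn pattern file_path)) then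
      categories.modify "dependencies" [] (fun l => l ++ [file_path])
    else if ([".json", ".yaml", ".yml", ".toml", ".ini", ".env"].any (fun ext => PySem.Str.endswith file_path ext)) then
      categories.modify "config" [] (fun l => l ++ [file_path])
    else if ([".py", ".js", ".ts", ".java", ".cpp", ".c", ".go", ".rb", ".php", ".rs", ".swift"].any (fun ext => PySem.Str.endswith file_path ext)) then
      categories.modify "source_code" [] (fun l => l ++ [file_path])
    else
      categories.modify "other" [] (fun l => l ++ [file_path])) categories
  categories.items

-- ===== PORT B =====
-- B's rule table: (category, predicate), scanned first-match.
def pvRules : List (String × (String → Bool)) :=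
  [("tests", fun p => (["/test/", "_test.", ".test.", "/tests/", "spec."].any (fun x => PySem.Str.isIn x p))
      || PySem.Str.startswith p "test/" || PySem.Str.startswith p "tests/"),
   ("documentation", fun p => [".md", ".txt", ".rst", ".adoc"].any (fun e => PySem.Str.endswith p e)),
   ("dependencies", fun p => ["package.json", "requirements.txt", "Gemfile", "pom.xml", "build.gradle"].any (fun x => PySem.Str.isIn x p)),
   ("config", fun p => [".json", ".yaml", ".yml", ".toml", ".ini", ".env"].any (fun e => PySem.Str.endswith p e)),
   ("source_code", fun p => [".py", ".js", ".ts", ".java", ".cpp", ".c", ".go", ".rb", ".php", ".rs", ".swift"].any (fun e => PySem.Str.endswith p e))]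

def pvCategory (p : String) : String :=
  ((pvRules.find? (fun r => r.2 p)).map (fun r => r.1)).getD "other"

def categorize_file_changes_alt (file_changes : List (List (String × String))) : List (String × List String) :=
  let paths := file_changes.map (fun change => (PySem.Dict.mk change).getD "file_path" "")
  ["source_code", "tests", "documentation", "config", "dependencies", "other"].map
    (fun name => (name, paths.filter (fun p => pvCategory p == name)))

-- ===== PRECONDITION & SPEC =====
def Spec_categorize_file_changes (file_changes : List (List (String × String))) (out : List (String × List String)) : Prop := out = categorize_file_changes_alt file_changes
instance (file_changes : List (List (String × String))) (out : List (String × List String)) : Decidable (Spec_categorize_file_changes file_changes out) := by unfold Spec_categorize_file_changes; infer_instance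

-- ===== CLAIM (what is proved, stated in full; the proofs are below) =====
def Claim_equal_categorize_file_changes : Prop := ∀ (file_changes : List (List (String × String))), Dom_categorize_file_changes file_changes → Spec_categorize_file_changes file_changes (categorize_file_changes file_changes)

-- ===== LEMMAS AND PROOFS =====

-- proof-only abbreviations (B's five predicates, the six bucket names, A's initial dict)
def pvT1 : String → Bool := fun p => (["/test/", "_test.", ".test.", "/tests/", "spec."].any (fun x => PySem.Str.isIn x p))
      || PySem.Str.startswith p "test/" || PySem.Str.startswith p "tests/"
def pvT2 : String → Bool := fun p => [".md", ".txt", ".rst", ".adoc"].any (fun e => PySem.Str.endswith p e)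
def pvT3 : String → Bool := fun p => ["package.json", "requirements.txt", "Gemfile", "pom.xml", "build.gradle"].any (fun x => PySem.Str.isIn x p)
def pvT4 : String → Bool := fun p => [".json", ".yaml", ".yml", ".toml", ".ini", ".env"].any (fun e => PySem.Str.endswith p e)
def pvT5 : String → Bool := fun p => [".py", ".js", ".ts", ".java", ".cpp", ".c", ".go", ".rb", ".php", ".rs", ".swift"].any (fun e => PySem.Str.endswith p e)
def pvOrder : List String := ["source_code", "tests", "documentation", "config", "dependencies", "other"]
def pvInit : PySem.Dict String (List String) :=
  (((((PySem.Dict.empty.insert "source_code" []).insert "tests" []).insert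
      "documentation" []).insert "config" []).insert "dependencies" []).insert "other" []

theorem pvRules_eq : pvRules = [("tests", pvT1), ("documentation", pvT2), ("dependencies", pvT3),
    ("config", pvT4), ("source_code", pvT5)] := rfl

theorem pvCategory_eq (p : String) : pvCategory p =
    (if pvT1 p then "tests" else if pvT2 p then "documentation" else if pvT3 p then "dependencies"
     else if pvT4 p then "config" else if pvT5 p then "source_code" else "other") := by
  unfold pvCategory
  rw [pvRules_eq]
  cases h1 : pvT1 p <;> cases h2 : pvT2 p <;> cases h3 : pvT3 p <;> cases h4 : pvT4 p <;> cases h5 : pvT5 p <;>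
    simp [List.find?, h1, h2, h3, h4, h5]

theorem pvCat_mem (p : String) : pvCategory p ∈ pvOrder := by
  rw [pvCategory_eq]; split_ifs <;> simp [pvOrder]

theorem pvInit_keys : pvInit.keys = pvOrder := by decide

theorem pvInit_nodup : pvInit.keys.Nodup := by decide

theorem pvItems_fold (paths : List String) :
    (paths.foldl (fun d p => d.modify (pvCategory p) [] (fun l => l ++ [p])) pvInit).items
      = pvOrder.map (fun n => (n, paths.filter (fun p => pvCategory p == n))) := by
  have hfold : paths.foldl (fun d p => d.modify (pvCategory p) [] (fun l => l ++ [p])) pvInit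
      = (paths.map (fun p => (pvCategory p, p))).foldl
          (fun d q => d.modify q.1 [] (fun l => l ++ [q.2])) pvInit := by
    rw [List.foldl_map]
  rw [hfold]
  have hnd := PySem.Dict.nodup_keys_foldl_modify_key (paths.map (fun p => (pvCategory p, p)))
      (fun q => q.1) [] (fun d q v => v ++ [q.2]) pvInit pvInit_nodup
  rw [PySem.Dict.items_eq_map_keys _ hnd []]
  have hkeys : ((paths.map (fun p => (pvCategory p, p))).foldl
      (fun d q => d.modify q.1 [] (fun l => l ++ [q.2])) pvInit).keys = pvOrder := by
    rw [PySem.Dict.keys_foldl_modify_key (paths.map (fun p => (pvCategory p, p)))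
        (fun q => q.1) [] (fun d q v => v ++ [q.2]) pvInit]
    rw [pvInit_keys, PySem.Set.update_eq_append_filter]
    have hnil : (List.filter (fun y => !PySem.Set.contains pvOrder y)
        (PySem.Set.ofList ((paths.map (fun p => (pvCategory p, p))).map (fun q => q.1)))) = [] := by
      rw [List.filter_eq_nil_iff]
      intro a ha
      rw [PySem.Set.mem_ofList] at ha
      simp only [List.map_map, List.mem_map, Function.comp_def] at ha
      obtain ⟨p, -, hp⟩ := ha
      have hmem : a ∈ pvOrder := hp ▸ pvCat_mem p
      simp
      exact hmem
    rw [hnil, List.append_nil]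
  rw [hkeys]
  apply List.map_congr_left
  intro n hn
  rw [PySem.Dict.getD_foldl_modify_append]
  have h0 : pvInit.getD n [] = [] := by fin_cases hn <;> decide
  rw [h0, List.nil_append]
  congr 1
  rw [List.filter_map]
  simp [Function.comp_def]

theorem pvStep_eq :
    (fun (categories : PySem.Dict String (List String)) (change : List (String × String)) =>
      let file_path := (PySem.Dict.mk change).getD "file_path" ""
      if (["/test/", "_test.", ".test.", "/tests/", "spec."].any (fun pattern => PySem.Str.isIn pattern file_path))
         || PySem.Str.startswith file_path "test/" || PySem.Str.startswith file_path "tests/"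
         || PySem.Str.isIn "/test/" file_path || PySem.Str.isIn "/tests/" file_path then
        categories.modify "tests" [] (fun l => l ++ [file_path])
      else if ([".md", ".txt", ".rst", ".adoc"].any (fun ext => PySem.Str.endswith file_path ext)) then
        categories.modify "documentation" [] (fun l => l ++ [file_path])
      else if (["package.json", "requirements.txt", "Gemfile", "pom.xml", "build.gradle"].any (fun pattern => PySem.Str.isIn pattern file_path)) then
        categories.modify "dependencies" [] (fun l => l ++ [file_path])
      else if ([".json", ".yaml", ".yml", ".toml", ".ini", ".env"].any (fun ext => PySem.Str.endswith file_path ext)) then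
        categories.modify "config" [] (fun l => l ++ [file_path])
      else if ([".py", ".js", ".ts", ".java", ".cpp", ".c", ".go", ".rb", ".php", ".rs", ".swift"].any (fun ext => PySem.Str.endswith file_path ext)) then
        categories.modify "source_code" [] (fun l => l ++ [file_path])
      else
        categories.modify "other" [] (fun l => l ++ [file_path]))
    = (fun (d : PySem.Dict String (List String)) (change : List (String × String)) =>
        d.modify (pvCategory ((PySem.Dict.mk change).getD "file_path" "")) []
          (fun l => l ++ [(PySem.Dict.mk change).getD "file_path" ""])) := by
  funext d change
  rw [pvCategory_eq]
  cases h1 : pvT1 ((PySem.Dict.mk change).getD "file_path" "") <;>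
    cases h2 : pvT2 ((PySem.Dict.mk change).getD "file_path" "") <;>
    cases h3 : pvT3 ((PySem.Dict.mk change).getD "file_path" "") <;>
    cases h4 : pvT4 ((PySem.Dict.mk change).getD "file_path" "") <;>
    cases h5 : pvT5 ((PySem.Dict.mk change).getD "file_path" "") <;>
    simp_all [pvT1, pvT2, pvT3, pvT4, pvT5]

-- ===== VERDICT (by name: the statement is the Claim_ definition above) =====
theorem categorize_file_changes_spec : Claim_equal_categorize_file_changes := by
  intro fc _
  unfold Spec_categorize_file_changes categorize_file_changes categorize_file_changes_alt
  dsimp only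
  rw [pvStep_eq]
  have h := pvItems_fold (fc.map (fun change => (PySem.Dict.mk change).getD "file_path" ""))
  rw [List.foldl_map] at h
  exact h
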